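-- pv_equiv track=rewrite | github.com/yardbirds0/------ | components/advanced_widgets.py | _calculate_row_heights
-- ===== SOURCE A (Python) =====
-- from typing import Dict, List, Optional, Any, Tuple
--
-- def _calculate_row_heights(total_height: int, total_rows: int) -> List[int]:
--     if total_rows <= 0:
--         return [total_height]
--     base = total_height // total_rows
--     remainder = total_height - base * total_rows
--     heights: List[int] = []
--     for idx in range(total_rows):
--         extra = 1 if idx < remainder else 0
--         heights.append(base + extra)
--     return heights
-- ===== SOURCE B (Python) =====
-- from typing import List
--
-- def _calculate_row_heights(total_height: int, total_rows: int) -> List[int]: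
--     # Greedy peeling: repeatedly give the next row the ceiling share of what
--     # remains, shrinking the problem; the last (or only) row takes the rest.
--     heights: List[int] = []
--     h, n = total_height, total_rows
--     while n > 1:
--         first = -(-h // n)
--         heights.append(first)
--         h -= first
--         n -= 1
--     heights.append(h)
--     return heights
-- ===== Notes on version B (the rewrite author's own statement) =====
-- stated objective: alternative
-- what changed: Replaces the precomputed base/remainder plus per-index conditional loop by a greedy peeling loop: each row in turn takes the ceiling share of the remaining height and rows, the last row taking what is left; no base/remainder or guard is ever computed.
import Mathlib
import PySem

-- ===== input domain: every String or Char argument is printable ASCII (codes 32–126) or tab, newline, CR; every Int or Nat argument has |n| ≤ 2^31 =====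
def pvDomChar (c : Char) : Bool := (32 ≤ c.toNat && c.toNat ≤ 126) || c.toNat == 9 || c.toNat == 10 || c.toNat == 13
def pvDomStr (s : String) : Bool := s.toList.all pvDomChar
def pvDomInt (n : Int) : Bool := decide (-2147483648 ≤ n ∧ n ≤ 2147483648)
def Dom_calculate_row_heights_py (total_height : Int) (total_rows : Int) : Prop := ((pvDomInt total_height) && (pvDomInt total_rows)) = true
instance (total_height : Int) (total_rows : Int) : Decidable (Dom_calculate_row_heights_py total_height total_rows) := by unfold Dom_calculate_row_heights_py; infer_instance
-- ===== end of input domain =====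

-- B replaces A's precomputed base/remainder loop by greedy peeling: each row in
-- turn takes the ceiling share of the remaining height, the last row the rest.

-- ===== PORT A =====
def calculate_row_heights_py (total_height : Int) (total_rows : Int) : List Int :=
  if total_rows ≤ 0 then [total_height]
  else
    let base := PySem.Int.floordiv total_height total_rows
    let remainder := total_height - base * total_rows
    (PySem.List.pyRange 0 total_rows 1).foldl
      (fun heights idx =>
        let extra : Int := if idx < remainder then 1 else 0
        heights ++ [base + extra]) []

-- ===== PORT B =====
-- the while loop of Source B, as structural recursion on the shrinking row count
def pvPeelGo (heights : List Int) (h : Int) (n : Int) : List Int :=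
  if 1 < n then
    let first := -(PySem.Int.floordiv (-h) n)
    pvPeelGo (heights ++ [first]) (h - first) (n - 1)
  else heights ++ [h]
termination_by n.toNat
decreasing_by omega

def calculate_row_heights_py_alt (total_height : Int) (total_rows : Int) : List Int :=
  pvPeelGo [] total_height total_rows

-- ===== PRECONDITION & SPEC =====
def Spec_calculate_row_heights_py (total_height : Int) (total_rows : Int) (out : List Int) : Prop := out = calculate_row_heights_py_alt total_height total_rows
instance (total_height : Int) (total_rows : Int) (out : List Int) : Decidable (Spec_calculate_row_heights_py total_height total_rows out) := by unfold Spec_calculate_row_heights_py; infer_instance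

-- ===== CLAIM (what is proved, stated in full; the proofs are below) =====
def Claim_equal_calculate_row_heights_py : Prop := ∀ (total_height : Int) (total_rows : Int), Dom_calculate_row_heights_py total_height total_rows → Spec_calculate_row_heights_py total_height total_rows (calculate_row_heights_py total_height total_rows)

-- ===== LEMMAS AND PROOFS =====

-- A's result, characterised as a replicate block (ediv/emod form, valid for n > 0).
theorem pvA_replicate (h n : Int) (hn : 0 < n) :
    calculate_row_heights_py h n
      = List.replicate (h % n).toNat (h / n + 1) ++ List.replicate (n - h % n).toNat (h / n) := by
  unfold calculate_row_heights_py
  rw [if_neg (by omega)]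
  simp only
  rw [PySem.List.foldl_append_singleton_eq_map, List.nil_append]
  have hd : PySem.Int.floordiv h n = h / n := by
    simp [PySem.Int.floordiv, Int.fdiv_eq_ediv_of_nonneg _ (le_of_lt hn)]
  have hq : h / n * n + h % n = h := by
    rw [Int.mul_comm]; exact Int.mul_ediv_add_emod h n
  have hrem : h - h / n * n = h % n := by omega
  rw [hd, hrem]
  have h0 : 0 ≤ h % n := Int.emod_nonneg h (ne_of_gt hn)
  have h1 : h % n < n := Int.emod_lt_of_pos h hn
  rw [PySem.List.pyRange_one_append 0 (h % n) n h0 (le_of_lt h1), List.map_append]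
  congr 1
  · rw [List.map_congr_left (g := fun _ => h / n + 1)
      (by intro x hx; rw [PySem.List.mem_pyRange_one] at hx; simp [hx.2])]
    simp [List.map_const', PySem.List.length_pyRange_one]
  · rw [List.map_congr_left (g := fun _ => h / n)
      (by intro x hx; rw [PySem.List.mem_pyRange_one] at hx
          simp [not_lt.mpr hx.1])]
    simp [List.map_const', PySem.List.length_pyRange_one]

-- B's peeling loop produces the same replicate block, by induction on the row count.
theorem pvB_replicate (k : Nat) : ∀ (acc : List Int) (h : Int), 1 ≤ k →
    pvPeelGo acc h (k : Int)
      = acc ++ (List.replicate (h % (k : Int)).toNat (h / (k : Int) + 1)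
          ++ List.replicate ((k : Int) - h % (k : Int)).toNat (h / (k : Int))) := by
  induction k with
  | zero => intro acc h hk; omega
  | succ k ih =>
    intro acc h _
    by_cases hk1 : k = 0
    · subst hk1
      unfold pvPeelGo
      norm_num
    · have hkpos : (0 : Int) < (k : Int) := by exact_mod_cast Nat.pos_of_ne_zero hk1
      have hn : (0 : Int) < ((k : Int) + 1) := by omega
      unfold pvPeelGo
      rw [if_pos (by push_cast; omega)]
      simp only
      have hd : PySem.Int.floordiv (-h) ((k : Int) + 1) = (-h) / ((k : Int) + 1) := by
        simp [PySem.Int.floordiv, Int.fdiv_eq_ediv_of_nonneg _ (le_of_lt hn)]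
      set n : Int := (k : Int) + 1 with hndef
      have hcast : ((k + 1 : Nat) : Int) = n := by push_cast; omega
      have hq := Int.mul_ediv_add_emod h n
      have hq' := Int.mul_ediv_add_emod (-h) n
      have h0 : 0 ≤ h % n := Int.emod_nonneg h (ne_of_gt hn)
      have h1 : h % n < n := Int.emod_lt_of_pos h hn
      have h0' : 0 ≤ (-h) % n := Int.emod_nonneg (-h) (ne_of_gt hn)
      have h1' : (-h) % n < n := Int.emod_lt_of_pos (-h) hn
      -- the ceiling share equals h/n, plus one when the division is inexact
      have hfirst : -((-h) / n) = h / n + (if 0 < h % n then 1 else 0) := by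
        split
        · rename_i hr
          have : (-h) / n = -(h / n) - 1 := by nlinarith [hq, hq']
          omega
        · rename_i hr
          have hr0 : h % n = 0 := by omega
          have : (-h) / n = -(h / n) := by nlinarith [hq, hq']
          omega
      rw [hcast, hd, hfirst]
      have hnk : n - 1 = (k : Int) := by omega
      by_cases hr : 0 < h % n
      · rw [if_pos hr]
        have heq : h - (h / n + 1) = (h % n - 1) + (h / n) * (k : Int) := by
          have : n = (k : Int) + 1 := hndef
          nlinarith [hq]
        have hdiv : (h - (h / n + 1)) / (k : Int) = h / n := by
          rw [heq, Int.add_mul_ediv_right _ _ (ne_of_gt hkpos),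
              Int.ediv_eq_zero_of_lt (by omega) (by omega)]
          omega
        have hmod : (h - (h / n + 1)) % (k : Int) = h % n - 1 := by
          have hq2 := Int.mul_ediv_add_emod (h - (h / n + 1)) (k : Int)
          rw [hdiv, Int.mul_comm] at hq2
          omega
        rw [hnk, ih (acc ++ [h / n + 1]) (h - (h / n + 1)) (Nat.one_le_iff_ne_zero.mpr hk1),
            hdiv, hmod]
        have hrepl : ((h % n).toNat) = ((h % n - 1).toNat) + 1 := by omega
        rw [hrepl, List.replicate_succ,
            show ((k : Int) - (h % n - 1)).toNat = (n - h % n).toNat from by omega]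
        simp [List.append_assoc]
      · rw [if_neg hr]
        have hr0 : h % n = 0 := by omega
        have heq : h - (h / n + 0) = 0 + (h / n) * (k : Int) := by
          have : n = (k : Int) + 1 := hndef
          nlinarith [hq]
        have hdiv : (h - (h / n + 0)) / (k : Int) = h / n := by
          rw [heq, Int.add_mul_ediv_right _ _ (ne_of_gt hkpos)]
          simp
        have hmod : (h - (h / n + 0)) % (k : Int) = 0 := by
          have hq2 := Int.mul_ediv_add_emod (h - (h / n + 0)) (k : Int)
          rw [hdiv, Int.mul_comm] at hq2
          omega
        rw [hnk, ih (acc ++ [h / n + 0]) (h - (h / n + 0)) (Nat.one_le_iff_ne_zero.mpr hk1),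
            hdiv, hmod, hr0]
        rw [show (n - 0).toNat = ((k : Int) - 0).toNat + 1 from by omega, List.replicate_succ]
        simp [List.append_assoc]

-- ===== VERDICT (by name: the statement is the Claim_ definition above) =====
theorem calculate_row_heights_py_spec : Claim_equal_calculate_row_heights_py := by
  intro h n _
  unfold Spec_calculate_row_heights_py
  by_cases hn : n ≤ 0
  · unfold calculate_row_heights_py calculate_row_heights_py_alt pvPeelGo
    rw [if_pos hn, if_neg (by omega)]
    rfl
  · rw [not_le] at hn
    have hk : n = ((n.toNat : Nat) : Int) := by omega
    unfold calculate_row_heights_py_alt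
    rw [pvA_replicate h n hn, hk, pvB_replicate n.toNat [] h (by omega), List.nil_append]
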